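-- pv_equiv track=rewrite | github.com/xuekanhua/poincare-embeddings | medical_embeddings.py | _determine_parent
-- ===== SOURCE A (Python) =====
-- from typing import Dict, Iterable, Iterator, List, Sequence, Tuple
--
-- def _determine_parent(
--     code: str, level_lengths: Tuple[int, ...], nodes: Sequence[str]
-- ) -> str | None:
--     """Pick the nearest valid prefix as the parent for `code` if present."""
--
--     candidate_lengths = [length for length in level_lengths if length < len(code)]
--     for length in sorted(candidate_lengths, reverse=True):
--         candidate = code[:length]
--         if candidate in nodes:
--             return candidate
--     return None
-- ===== SOURCE B (Python) =====
-- def _determine_parent(code, level_lengths, nodes):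
--     node_set = set(nodes)
--     n = len(code)
--     best = None
--     for length in level_lengths:
--         if length < n and (best is None or length > best) and code[:length] in node_set:
--             best = length
--     return code[:best] if best is not None else None
-- ===== Notes on version B (the rewrite author's own statement) =====
-- stated objective: faster
-- what changed: A filters the lengths, sorts them descending and linearly scans the node list for each candidate prefix until the first hit; B makes a single unsorted pass over level_lengths keeping a running maximum matching length against a set built once from nodes, slicing once at the end.
import Mathlib
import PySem

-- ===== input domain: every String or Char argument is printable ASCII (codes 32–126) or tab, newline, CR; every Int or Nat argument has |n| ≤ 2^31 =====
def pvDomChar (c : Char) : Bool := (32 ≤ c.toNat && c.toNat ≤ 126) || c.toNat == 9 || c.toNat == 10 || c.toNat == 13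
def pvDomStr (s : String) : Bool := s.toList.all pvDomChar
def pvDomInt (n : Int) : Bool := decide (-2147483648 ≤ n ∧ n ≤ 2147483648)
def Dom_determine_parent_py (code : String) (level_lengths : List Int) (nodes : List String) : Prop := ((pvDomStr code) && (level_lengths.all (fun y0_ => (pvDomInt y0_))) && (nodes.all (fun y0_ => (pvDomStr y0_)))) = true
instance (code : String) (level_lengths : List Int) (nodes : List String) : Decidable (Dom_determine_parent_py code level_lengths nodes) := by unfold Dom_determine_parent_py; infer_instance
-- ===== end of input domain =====

-- B replaces A's filter+descending-sort+first-membership-hit with a single running-maximum pass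
-- over level_lengths against a set of nodes (alternative decomposition; same results).

-- ===== PORT A =====
-- code[:length]  (Python slice semantics, any sign of length)
def detParentCand (code : String) (length : Int) : String :=
  PySem.Str.slice code none (some length)

-- the for-loop of A: first length (in the given order) whose prefix is in nodes
def detParentLoop (code : String) (nodes : List String) : List Int → Option String
  | [] => none
  | length :: rest =>
    let candidate := detParentCand code length
    if nodes.contains candidate then some candidate else detParentLoop code nodes rest

def determine_parent_py (code : String) (level_lengths : List Int) (nodes : List String) : Option String :=
  let candidate_lengths := level_lengths.filter (fun length => decide (length < PySem.Str.len code))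
  detParentLoop code nodes (PySem.List.sorted candidate_lengths (fun x => x) true)

-- ===== PORT B =====
def determine_parent_py_alt (code : String) (level_lengths : List Int) (nodes : List String) : Option String :=
  let node_set := PySem.Set.ofList nodes
  let n := PySem.Str.len code
  let best := level_lengths.foldl (fun best length =>
    if decide (length < n) &&
        (match best with | none => true | some b => decide (b < length)) &&
        node_set.contains (PySem.Str.slice code none (some length))
    then some length else best) (none : Option Int)
  match best with
  | some b => some (PySem.Str.slice code none (some b))
  | none => none

-- ===== PRECONDITION & SPEC =====
def Spec_determine_parent_py (code : String) (level_lengths : List Int) (nodes : List String) (out : Option String) : Prop := out = determine_parent_py_alt code level_lengths nodes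
instance (code : String) (level_lengths : List Int) (nodes : List String) (out : Option String) : Decidable (Spec_determine_parent_py code level_lengths nodes out) := by unfold Spec_determine_parent_py; infer_instance

-- ===== CLAIM (what is proved, stated in full; the proofs are below) =====
def Claim_equal_determine_parent_py : Prop := ∀ (code : String) (level_lengths : List Int) (nodes : List String), Dom_determine_parent_py code level_lengths nodes → Spec_determine_parent_py code level_lengths nodes (determine_parent_py code level_lengths nodes)

-- ===== LEMMAS AND PROOFS =====

-- running maximum over an Option Int accumulator
def pmaxStep (b : Option Int) (l : Int) : Option Int :=
  match b with
  | none => some l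
  | some a => some (max a l)

def pmax (t : List Int) : Option Int := t.foldl pmaxStep none

theorem foldl_pmaxStep_stay (l : List Int) (a : Int) (h : ∀ y ∈ l, y ≤ a) :
    l.foldl pmaxStep (some a) = some a := by
  induction l with
  | nil => rfl
  | cons y t ih =>
    have hy : y ≤ a := h y (by simp)
    simp only [List.foldl_cons, pmaxStep, max_eq_left hy]
    exact ih (fun z hz => h z (by simp [hz]))

theorem pmaxStep_rightComm : ∀ (b : Option Int) (x y : Int),
    pmaxStep (pmaxStep b x) y = pmaxStep (pmaxStep b y) x := by
  intro b x y
  cases b <;> simp [pmaxStep, max_comm, max_left_comm]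

theorem pmax_perm {t t' : List Int} (h : t.Perm t') : pmax t = pmax t' := by
  haveI : RightCommutative pmaxStep := ⟨fun b x y => pmaxStep_rightComm b x y⟩
  exact h.foldl_eq none

-- A's loop is find?, rendered through the candidate slice
theorem detParentLoop_eq_find? (code : String) (nodes : List String) (ls : List Int) :
    detParentLoop code nodes ls
      = (ls.find? (fun l => nodes.contains (detParentCand code l))).map (detParentCand code) := by
  induction ls with
  | nil => rfl
  | cons l rest ih =>
    by_cases h : detParentCand code l ∈ nodes
    · simp [detParentLoop, List.find?, h]
    · simp [detParentLoop, List.find?, h, ih]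

-- first match in a descending list = maximum match
theorem find?_pairwise_eq_pmax (p : Int → Bool) (t : List Int)
    (h : t.Pairwise (fun a b => b ≤ a)) :
    t.find? p = pmax (t.filter p) := by
  induction t with
  | nil => rfl
  | cons x rest ih =>
    rcases List.pairwise_cons.mp h with ⟨hx, hrest⟩
    by_cases hp : p x = true
    · simp only [List.find?, hp, List.filter_cons, pmax]
      show some x = List.foldl pmaxStep (pmaxStep none x) (rest.filter p)
      simp only [pmaxStep]
      exact (foldl_pmaxStep_stay _ x (fun y hy => hx y (List.mem_of_mem_filter hy))).symm
    · simp only [Bool.not_eq_true] at hp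
      simp only [List.find?, hp, List.filter_cons, pmax]
      simp only [Bool.false_eq_true, if_false]
      exact ih hrest

-- set membership in set(nodes) is list membership in nodes
theorem contains_ofList_eq (nodes : List String) (x : String) :
    (PySem.Set.ofList nodes).contains x = nodes.contains x := by
  rw [PySem.Set.contains_eq_listContains]
  simp [PySem.Set.mem_ofList]

-- a fold whose step fixes the accumulator outside q only sees the q-filtered list
theorem foldl_eq_foldl_filter {α β : Type} (f : β → α → β) (q : α → Bool)
    (hf : ∀ b l, q l = false → f b l = b) :
    ∀ (ls : List α) (b : β), ls.foldl f b = (ls.filter q).foldl f b := by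
  intro ls
  induction ls with
  | nil => intro b; rfl
  | cons l rest ih =>
    intro b
    by_cases hq : q l = true
    · simp [hq, ih]
    · simp only [Bool.not_eq_true] at hq
      simp [hq, hf b l hq, ih]

theorem determine_parent_py_eq (code : String) (level_lengths : List Int) (nodes : List String) :
    determine_parent_py code level_lengths nodes
      = determine_parent_py_alt code level_lengths nodes := by
  set n := PySem.Str.len code with hn
  set p : Int → Bool := fun l => nodes.contains (detParentCand code l) with hp
  set q : Int → Bool := fun l => decide (l < n) && p l with hq
  -- A side
  have hA : determine_parent_py code level_lengths nodes
      = (pmax (level_lengths.filter q)).map (detParentCand code) := by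
    unfold determine_parent_py
    rw [detParentLoop_eq_find?]
    rw [find?_pairwise_eq_pmax p _ (PySem.List.sorted_pairwise_rev _ (fun x => x))]
    congr 1
    apply pmax_perm
    have h1 : (PySem.List.sorted (level_lengths.filter (fun length => decide (length < n))) (fun x => x) true).filter p
        |>.Perm ((level_lengths.filter (fun length => decide (length < n))).filter p) :=
      (PySem.List.sorted_perm _ _ _).filter p
    refine h1.trans ?_
    rw [List.filter_filter]
    apply List.Perm.of_eq
    apply List.filter_congr
    intro l _
    simp [hq, Bool.and_comm]
  -- B side
  have hB : determine_parent_py_alt code level_lengths nodes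
      = (pmax (level_lengths.filter q)).map (detParentCand code) := by
    show (match level_lengths.foldl (fun best length =>
        if decide (length < n) &&
            (match best with | none => true | some b => decide (b < length)) &&
            (PySem.Set.ofList nodes).contains (PySem.Str.slice code none (some length))
        then some length else best) (none : Option Int) with
      | some b => some (PySem.Str.slice code none (some b))
      | none => none)
      = (pmax (level_lengths.filter q)).map (detParentCand code)
    have hstep : ∀ (b : Option Int) (l : Int), q l = false →
        (if decide (l < n) &&
            (match b with | none => true | some a => decide (a < l)) &&
            (PySem.Set.ofList nodes).contains (PySem.Str.slice code none (some l))
         then some l else b) = b := by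
      intro b l hql
      rw [if_neg]
      intro hcond
      simp only [Bool.and_eq_true] at hcond
      rw [contains_ofList_eq] at hcond
      have : q l = true := by
        simp only [hq, Bool.and_eq_true]
        exact ⟨hcond.1.1, hcond.2⟩
      simp [this] at hql
    rw [foldl_eq_foldl_filter _ q hstep]
    have hcong : (level_lengths.filter q).foldl (fun b l =>
        if decide (l < n) &&
            (match b with | none => true | some a => decide (a < l)) &&
            (PySem.Set.ofList nodes).contains (PySem.Str.slice code none (some l))
         then some l else b) none
        = (level_lengths.filter q).foldl pmaxStep none := by
      apply PySem.List.foldl_congr_mem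
      intro b l hl
      have hql : q l = true := List.of_mem_filter hl
      rw [hq] at hql
      simp only [Bool.and_eq_true] at hql
      have h1 : decide (l < n) = true := hql.1
      have h2 : nodes.contains (PySem.Str.slice code none (some l)) = true := hql.2
      rw [contains_ofList_eq, h1, h2]
      cases b with
      | none => simp [pmaxStep]
      | some a =>
        by_cases hal : a < l
        · simp [pmaxStep, hal, max_eq_right (le_of_lt hal)]
        · simp [pmaxStep, hal, max_eq_left (le_of_not_gt hal)]
    rw [hcong]
    show (match pmax (level_lengths.filter q) with
          | some b => some (PySem.Str.slice code none (some b))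
          | none => none)
        = (pmax (level_lengths.filter q)).map (detParentCand code)
    cases pmax (level_lengths.filter q) <;> rfl
  rw [hA, hB]

-- ===== VERDICT (by name: the statement is the Claim_ definition above) =====
theorem determine_parent_py_spec : Claim_equal_determine_parent_py := by
  intro code level_lengths nodes _
  unfold Spec_determine_parent_py
  exact determine_parent_py_eq code level_lengths nodes
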